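-- pv_equiv track=rewrite | github.com/pingcap/tidb | .agents/skills/column-masking-auto-validation/scripts/generate_report.py | render_summary_block
-- ===== SOURCE A (Python) =====
-- from typing import Dict, List, Tuple
--
-- STATUS_ORDER = ["PASS", "FAIL", "PARTIAL", "NOT_COVERED", "N/A"]
--
-- def render_summary_block(scenarios: List[dict]) -> str:
--     counts = {k: 0 for k in STATUS_ORDER}
--     for s in scenarios:
--         counts[s["status"]] = counts.get(s["status"], 0) + 1
--     lines = [f"- Total scenarios: {len(scenarios)}"]
--     for k in STATUS_ORDER:
--         lines.append(f"- {k}: {counts.get(k, 0)}")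
--     return "\n".join(lines)
-- ===== SOURCE B (Python) =====
-- STATUS_ORDER = ["PASS", "FAIL", "PARTIAL", "NOT_COVERED", "N/A"]
--
-- def _runs(statuses):
--     """Run-length encode a sorted list: [(value, run length), ...]."""
--     if not statuses:
--         return []
--     x = statuses[0]
--     n = 1
--     while n < len(statuses) and statuses[n] == x:
--         n += 1
--     return [(x, n)] + _runs(statuses[n:])
--
-- def _run_len(runs, k):
--     for v, c in runs:
--         if v == k:
--             return c
--     return 0
--
-- def render_summary_block(scenarios):
--     runs = _runs(sorted(s["status"] for s in scenarios))
--     parts = ["- Total scenarios: %d" % len(scenarios)]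
--     for k in STATUS_ORDER:
--         parts.append("- %s: %d" % (k, _run_len(runs, k)))
--     return "\n".join(parts)
-- ===== Notes on version B (the rewrite author's own statement) =====
-- stated objective: alternative
-- what changed: Replaces A's hash-table counting pass by sort-based grouping: B sorts the statuses, run-length-encodes the sorted list into (status, run length) pairs, and each summary line looks its status up in that run list.
import Mathlib
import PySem

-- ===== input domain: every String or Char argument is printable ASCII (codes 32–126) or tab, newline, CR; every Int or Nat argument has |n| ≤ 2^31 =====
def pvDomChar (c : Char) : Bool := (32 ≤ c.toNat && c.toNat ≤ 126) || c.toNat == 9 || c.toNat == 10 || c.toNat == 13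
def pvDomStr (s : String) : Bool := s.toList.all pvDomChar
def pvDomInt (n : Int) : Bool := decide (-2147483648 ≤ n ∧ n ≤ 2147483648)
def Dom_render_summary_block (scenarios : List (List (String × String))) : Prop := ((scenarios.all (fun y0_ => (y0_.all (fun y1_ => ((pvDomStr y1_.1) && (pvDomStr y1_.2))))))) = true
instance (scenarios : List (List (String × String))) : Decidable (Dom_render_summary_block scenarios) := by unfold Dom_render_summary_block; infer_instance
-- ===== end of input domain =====

-- B replaces A's hash-table counting pass by sort-based grouping: sort the statuses,
-- run-length-encode the sorted list, look each summary status up in the run list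
-- (alternative algorithm; return value only, no mutation).

def STATUS_ORDER : List String := ["PASS", "FAIL", "PARTIAL", "NOT_COVERED", "N/A"]

-- ===== PORT A =====
-- s["status"] raises KeyError when the key is absent; Pre_ excludes that, the port uses getD "".
def render_summary_block (scenarios : List (List (String × String))) : String :=
  let counts : PySem.Dict String Int := PySem.Dict.ofList (STATUS_ORDER.map (fun k => (k, 0)))
  let counts := scenarios.foldl
    (fun d s =>
      let st := (PySem.Dict.mk s).getD "status" ""
      d.insert st (d.getD st 0 + 1)) counts
  let lines := ["- Total scenarios: " ++ PySem.Int.toStr scenarios.length]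
  let lines := STATUS_ORDER.foldl
    (fun ls k => ls ++ ["- " ++ k ++ ": " ++ PySem.Int.toStr (counts.getD k 0)]) lines
  PySem.Str.join "\n" lines

-- ===== PORT B =====
-- _runs: the while loop counting equal elements after the head is the maximal equal
-- prefix of the tail (takeWhile), and statuses[n:] is the rest of the tail (dropWhile).
def pvRuns : List String → List (String × Int)
  | [] => []
  | x :: xs =>
    (x, (1 : Int) + (xs.takeWhile (· == x)).length) :: pvRuns (xs.dropWhile (· == x))
termination_by l => l.length
decreasing_by
  simpa [Nat.lt_succ_iff] using List.length_dropWhile_le (· == x) xs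

def pvRunLen : List (String × Int) → String → Int
  | [], _ => 0
  | (v, c) :: rest, k => if v == k then c else pvRunLen rest k

def render_summary_block_alt (scenarios : List (List (String × String))) : String :=
  let runs := pvRuns (PySem.List.sorted
    (scenarios.map (fun s => (PySem.Dict.mk s).getD "status" "")) (fun x => x) false)
  let parts := ["- Total scenarios: " ++ PySem.Int.toStr scenarios.length]
  let parts := STATUS_ORDER.foldl
    (fun ps k => ps ++ ["- " ++ k ++ ": " ++ PySem.Int.toStr (pvRunLen runs k)]) parts
  PySem.Str.join "\n" parts

-- ===== PRECONDITION & SPEC =====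
-- Pre_: every scenario dict has a "status" key; otherwise Python's s["status"] raises KeyError
-- (in both A and B).
def Pre_render_summary_block (scenarios : List (List (String × String))) : Prop :=
  ∀ s ∈ scenarios, "status" ∈ s.map Prod.fst
instance (scenarios : List (List (String × String))) : Decidable (Pre_render_summary_block scenarios) := by unfold Pre_render_summary_block; infer_instance
def pvWitness_render_summary_block : (List (List (String × String))) :=
  [[("status", "PASS")], [("status", "WEIRD"), ("note", "x")], [("status", "FAIL")]]

def Spec_render_summary_block (scenarios : List (List (String × String))) (out : String) : Prop := out = render_summary_block_alt scenarios
instance (scenarios : List (List (String × String))) (out : String) : Decidable (Spec_render_summary_block scenarios out) := by unfold Spec_render_summary_block; infer_instance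

-- ===== CLAIM (what is proved, stated in full; the proofs are below) =====
def Claim_equal_render_summary_block : Prop := ∀ (scenarios : List (List (String × String))), Dom_render_summary_block scenarios → Pre_render_summary_block scenarios → Spec_render_summary_block scenarios (render_summary_block scenarios)

-- ===== LEMMAS AND PROOFS =====

-- the status A and B both read from a scenario
def pvStat (s : List (String × String)) : String := (PySem.Dict.mk s).getD "status" ""

-- A's final per-key count equals (# scenarios with that status).
theorem countsA_getD (scenarios : List (List (String × String))) (k : String)
    (hk : (PySem.Dict.ofList [("PASS", (0:Int)), ("FAIL", 0), ("PARTIAL", 0), ("NOT_COVERED", 0), ("N/A", 0)]).getD k 0 = 0) :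
    (scenarios.foldl
      (fun d s =>
        d.insert ((PySem.Dict.mk s).getD "status" "")
          (d.getD ((PySem.Dict.mk s).getD "status" "") 0 + 1))
      (PySem.Dict.ofList [("PASS", (0:Int)), ("FAIL", 0), ("PARTIAL", 0), ("NOT_COVERED", 0), ("N/A", 0)])).getD k 0
      = ((scenarios.map pvStat).count k : Int) := by
  have h := PySem.Dict.getD_foldl_insert_add_one (l := scenarios.map pvStat)
    (d := PySem.Dict.ofList [("PASS", (0:Int)), ("FAIL", 0), ("PARTIAL", 0), ("NOT_COVERED", 0), ("N/A", 0)]) (v := k)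
  rw [List.foldl_map] at h
  simpa [pvStat, hk] using h

-- On a ≤-sorted list, looking a value up in the run-length encoding yields its count:
-- equal elements are adjacent, so the value's run (if any) holds all its occurrences.
theorem runLen_runs_count (l : List String) (hl : l.Pairwise (· ≤ ·)) (k : String) :
    pvRunLen (pvRuns l) k = (l.count k : Int) := by
  induction l using pvRuns.induct with
  | case1 => simp [pvRuns, pvRunLen]
  | case2 x xs ih =>
    have hxs : xs.Pairwise (· ≤ ·) := (List.pairwise_cons.mp hl).2
    have hxle : ∀ y ∈ xs, x ≤ y := (List.pairwise_cons.mp hl).1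
    have hsplit : xs.takeWhile (· == x) ++ xs.dropWhile (· == x) = xs :=
      List.takeWhile_append_dropWhile
    have htake : ∀ y ∈ xs.takeWhile (· == x), y = x := by
      intro y hy
      simpa using List.mem_takeWhile_imp hy
    have hdropnx : ∀ y ∈ xs.dropWhile (· == x), y ≠ x := by
      intro y hy
      rcases hd : xs.dropWhile (· == x) with _ | ⟨z, zs⟩
      · simp [hd] at hy
      · have hz : ¬ (z == x) = true := by
          have := List.head?_dropWhile_not (· == x) xs
          rw [hd] at this; simpa using this
        have hzne : z ≠ x := by simpa using hz
        have hzmem : z ∈ xs := by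
          have hz' : z ∈ xs.dropWhile (· == x) := by simp [hd]
          exact List.Sublist.mem hz' (List.dropWhile_sublist _)
        have hxz : x < z := lt_of_le_of_ne (hxle z hzmem) (Ne.symm hzne)
        have hpd : (xs.dropWhile (· == x)).Pairwise (· ≤ ·) :=
          hxs.sublist (List.dropWhile_sublist _)
        rw [hd] at hy hpd
        rcases List.mem_cons.mp hy with rfl | hyz
        · exact hzne
        · have hzy : z ≤ y := (List.pairwise_cons.mp hpd).1 y hyz
          have hxy : x < y := lt_of_lt_of_le hxz hzy
          exact fun h => absurd (h ▸ hxy) (lt_irrefl x)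
    by_cases hk : x = k
    · subst hk
      have hct : (xs.takeWhile (· == x)).count x = (xs.takeWhile (· == x)).length :=
        List.count_eq_length.mpr (fun y hy => (htake y hy).symm)
      have hcd : (xs.dropWhile (· == x)).count x = 0 :=
        List.count_eq_zero.mpr (fun h => (hdropnx x h) rfl)
      have hcxs : xs.count x = (xs.takeWhile (· == x)).length := by
        have h := congrArg (List.count x) hsplit
        rw [List.count_append, hct, hcd] at h
        omega
      simp [pvRuns, pvRunLen, List.count_cons_self, hcxs]
      ring
    · have hcd : (xs.dropWhile (· == x)).count k = xs.count k := by
        have h := congrArg (List.count k) hsplit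
        have ht0 : (xs.takeWhile (· == x)).count k = 0 :=
          List.count_eq_zero.mpr (fun h => hk (htake k h).symm)
        rw [List.count_append, ht0] at h
        omega
      have := ih (hxs.sublist (List.dropWhile_sublist _))
      simp [pvRuns, pvRunLen, hk, this, hcd]

-- B's run-list lookup over the sorted statuses is the plain count of that status.
theorem runLen_sorted (l : List String) (k : String) :
    pvRunLen (pvRuns (PySem.List.sorted l (fun x => x) false)) k = (l.count k : Int) := by
  rw [runLen_runs_count _ (by simpa using PySem.List.sorted_pairwise l (fun x => x)) k,
    (PySem.List.sorted_perm l (fun x => x) false).count_eq]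

-- ===== VERDICT (by name: the statement is the Claim_ definition above) =====
theorem render_summary_block_spec : Claim_equal_render_summary_block := by
  intro scenarios _ _
  unfold Spec_render_summary_block render_summary_block render_summary_block_alt
  simp only [STATUS_ORDER, List.foldl_cons, List.foldl_nil, List.map_cons, List.map_nil,
    List.cons_append, List.nil_append]
  rw [countsA_getD scenarios "PASS" (by decide), countsA_getD scenarios "FAIL" (by decide),
    countsA_getD scenarios "PARTIAL" (by decide), countsA_getD scenarios "NOT_COVERED" (by decide),
    countsA_getD scenarios "N/A" (by decide),
    runLen_sorted _ "PASS", runLen_sorted _ "FAIL", runLen_sorted _ "PARTIAL",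
    runLen_sorted _ "NOT_COVERED", runLen_sorted _ "N/A"]
  rfl
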